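-- pv_equiv track=rewrite | github.com/Kavin4240/crickvision-fastapi | txtcln.py | identify_thinking_patterns
-- ===== SOURCE A (Python) =====
-- def identify_thinking_patterns(user_responses, thinking_patterns):
--     pattern_scores = {pattern: 0 for pattern in thinking_patterns}
--
--     for response in user_responses:
--         for word in response:
--             for pattern, keywords in thinking_patterns.items():
--                 if word in keywords:
--                     pattern_scores[pattern] += 1
--
--     # Optionally, normalize scores or apply different logic to select best match
--     # For simplicity, here we just return the pattern scores
--     return pattern_scores
-- ===== SOURCE B (Python) =====
-- def identify_thinking_patterns(user_responses, thinking_patterns):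
--     # Faster: tally all words once into a counts dict, then score each pattern as the
--     # sum of the counts of its distinct keywords -- no per-word scan over every pattern.
--     counts = {}
--     for response in user_responses:
--         for word in response:
--             counts[word] = counts.get(word, 0) + 1
--     return {pattern: sum(counts.get(kw, 0) for kw in set(keywords))
--             for pattern, keywords in thinking_patterns.items()}
-- ===== Notes on version B (the rewrite author's own statement) =====
-- stated objective: faster
-- what changed: B builds a word-frequency counter in one pass and then computes each pattern's score as a sum of counts over its distinct keywords, instead of scanning every pattern's keyword list for every word.
import Mathlib
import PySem

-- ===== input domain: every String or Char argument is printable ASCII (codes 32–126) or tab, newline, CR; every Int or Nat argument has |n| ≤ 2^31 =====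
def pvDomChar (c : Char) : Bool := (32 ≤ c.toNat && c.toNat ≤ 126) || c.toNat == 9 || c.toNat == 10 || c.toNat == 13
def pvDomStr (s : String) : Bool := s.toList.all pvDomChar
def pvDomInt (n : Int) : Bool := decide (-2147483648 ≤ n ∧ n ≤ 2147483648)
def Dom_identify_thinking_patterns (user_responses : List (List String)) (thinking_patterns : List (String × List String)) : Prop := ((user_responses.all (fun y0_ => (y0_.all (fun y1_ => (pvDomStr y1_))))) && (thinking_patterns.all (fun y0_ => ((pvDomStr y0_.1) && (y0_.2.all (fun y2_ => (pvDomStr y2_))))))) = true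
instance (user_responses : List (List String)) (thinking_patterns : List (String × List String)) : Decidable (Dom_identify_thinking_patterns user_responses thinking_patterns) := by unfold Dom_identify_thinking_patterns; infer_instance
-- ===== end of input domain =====

-- B tallies all words once into a frequency counter, then scores each pattern by summing
-- the counts of its distinct keywords (objective: faster, one pass over the words).

-- ===== PORT A =====
-- The dict argument arrives as an association list, modelled by PySem.Dict.ofList.
-- 'pattern_scores[pattern] += 1' is Dict.modify pk.1 0 (· + 1): the key is always a key
-- of the same dict, so the default 0 is never read and this is exact.
def identify_thinking_patterns (user_responses : List (List String)) (thinking_patterns : List (String × List String)) : List (String × Int) :=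
  let tp := PySem.Dict.ofList thinking_patterns
  let init := tp.keys.foldl (fun d p => d.insert p (0 : Int)) PySem.Dict.empty
  let final := user_responses.foldl (fun scores response =>
    response.foldl (fun scores word =>
      tp.items.foldl (fun scores pk =>
        if word ∈ pk.2 then scores.modify pk.1 0 (· + 1) else scores) scores) scores) init
  final.items

-- ===== PORT B =====
-- 'counts[word] = counts.get(word, 0) + 1' is Dict.insert word (getD word 0 + 1);
-- 'set(keywords)' is PySem.Set.ofList; the dict comprehension over .items() is a fold of
-- inserts over tp.items; 'sum(counts.get(kw, 0) …)' is the sum of the mapped getDs.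
def identify_thinking_patterns_alt (user_responses : List (List String)) (thinking_patterns : List (String × List String)) : List (String × Int) :=
  let counts := user_responses.foldl (fun counts response =>
    response.foldl (fun counts word => counts.insert word (counts.getD word 0 + 1)) counts)
    (PySem.Dict.empty : PySem.Dict String Int)
  let tp := PySem.Dict.ofList thinking_patterns
  (tp.items.foldl (fun res pk =>
      res.insert pk.1 (((PySem.Set.ofList pk.2).map (fun kw => counts.getD kw 0)).sum))
    (PySem.Dict.empty : PySem.Dict String Int)).items

-- ===== PRECONDITION & SPEC =====
def Spec_identify_thinking_patterns (user_responses : List (List String)) (thinking_patterns : List (String × List String)) (out : List (String × Int)) : Prop := out = identify_thinking_patterns_alt user_responses thinking_patterns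
instance (user_responses : List (List String)) (thinking_patterns : List (String × List String)) (out : List (String × Int)) : Decidable (Spec_identify_thinking_patterns user_responses thinking_patterns out) := by unfold Spec_identify_thinking_patterns; infer_instance

-- ===== CLAIM (what is proved, stated in full; the proofs are below) =====
def Claim_equal_identify_thinking_patterns : Prop := ∀ (user_responses : List (List String)) (thinking_patterns : List (String × List String)), Dom_identify_thinking_patterns user_responses thinking_patterns → Spec_identify_thinking_patterns user_responses thinking_patterns (identify_thinking_patterns user_responses thinking_patterns)

-- ===== LEMMAS AND PROOFS =====

-- Every key inserted with value 0 stays 0 (A's initialisation dict reads as 0 everywhere).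
theorem pv_getD_init (l : List String) (d : PySem.Dict String Int) (k : String)
    (h : d.getD k 0 = 0) :
    (l.foldl (fun d p => d.insert p (0 : Int)) d).getD k 0 = 0 := by
  induction l generalizing d with
  | nil => exact h
  | cons p rest ih =>
    refine ih _ ?_
    rw [PySem.Dict.getD_insert]
    split_ifs <;> simp [h]

-- A's inner scan over the pattern list, read at key k: it adds the number of entries
-- whose key is k and whose keyword list contains w.
theorem pv_pat_scan (l : List (String × List String)) (s : PySem.Dict String Int)
    (w k : String) :
    (l.foldl (fun s pk => if w ∈ pk.2 then s.modify pk.1 0 (· + 1) else s) s).getD k 0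
      = s.getD k 0 + (l.countP (fun pk => pk.1 == k && decide (w ∈ pk.2)) : Int) := by
  induction l generalizing s with
  | nil => simp
  | cons pk rest ih =>
    rw [List.foldl_cons, List.countP_cons]
    by_cases hw : w ∈ pk.2
    · rw [if_pos hw, ih, PySem.Dict.getD_modify]
      by_cases hk : k = pk.1
      · rw [if_pos hk]
        have : (pk.1 == k && decide (w ∈ pk.2)) = true := by simp [hk.symm, hw]
        rw [this, hk]
        simp only [if_true]
        push_cast
        ring
      · rw [if_neg hk]
        have : (pk.1 == k && decide (w ∈ pk.2)) = false := by
          simp only [Bool.and_eq_false_iff, beq_eq_false_iff_ne, ne_eq]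
          exact Or.inl (fun h => hk h.symm)
        rw [this]
        push_cast
        ring
    · rw [if_neg hw, ih]
      have : (pk.1 == k && decide (w ∈ pk.2)) = false := by simp [hw]
      rw [this]
      push_cast
      ring

-- In a list with duplicate-free keys containing (k, kws), the count above is the
-- 0/1 indicator of w ∈ kws.
theorem pv_count_uniq (l : List (String × List String)) (k : String) (kws : List String)
    (hnd : (l.map (·.1)).Nodup) (hmem : (k, kws) ∈ l) (w : String) :
    l.countP (fun pk => pk.1 == k && decide (w ∈ pk.2))
      = if w ∈ kws then 1 else 0 := by
  induction l with
  | nil => simp at hmem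
  | cons pk rest ih =>
    rw [List.map_cons, List.nodup_cons] at hnd
    rw [List.countP_cons]
    rcases List.mem_cons.mp hmem with heq | hrest
    · obtain rfl : pk = (k, kws) := heq.symm
      have hz : rest.countP (fun pk => pk.1 == k && decide (w ∈ pk.2)) = 0 := by
        rw [List.countP_eq_zero]
        intro q hq
        have hqk : q.1 ≠ k := fun h => hnd.1 (h ▸ List.mem_map_of_mem (f := fun x => x.1) hq)
        simp [hqk]
      rw [hz]
      by_cases hw : w ∈ kws <;> simp [hw]
    · have hne : pk.1 ≠ k := by
        intro hk
        exact hnd.1 (hk ▸ (List.mem_map_of_mem hrest : (k, kws).1 ∈ rest.map (·.1)))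
      rw [ih hnd.2 hrest]
      simp [hne]
  
-- A's word loop, read at a key k bound to kws in the pattern dict: each word adds its
-- membership indicator, so the whole loop adds the countP over the words.
theorem pv_word_loop (tpItems : List (String × List String)) (k : String) (kws : List String)
    (hnd : (tpItems.map (·.1)).Nodup) (hmem : (k, kws) ∈ tpItems)
    (ws : List String) (s : PySem.Dict String Int) :
    (ws.foldl (fun s w => tpItems.foldl (fun s pk =>
        if w ∈ pk.2 then s.modify pk.1 0 (· + 1) else s) s) s).getD k 0
      = s.getD k 0 + (ws.countP (fun w => decide (w ∈ kws)) : Int) := by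
  induction ws generalizing s with
  | nil => simp
  | cons w rest ih =>
    rw [List.foldl_cons, ih, pv_pat_scan, pv_count_uniq tpItems k kws hnd hmem w,
      List.countP_cons]
    by_cases hw : w ∈ kws
    · simp [hw]; ring
    · simp [hw]

-- A's scan step never adds a key (it only modifies keys that are already present).
theorem pv_keys_pat_scan (l : List (String × List String)) (s : PySem.Dict String Int)
    (w : String) (h : ∀ pk ∈ l, pk.1 ∈ s.keys) :
    (l.foldl (fun s pk => if w ∈ pk.2 then s.modify pk.1 0 (· + 1) else s) s).keys
      = s.keys := by
  induction l generalizing s with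
  | nil => rfl
  | cons pk rest ih =>
    rw [List.foldl_cons]
    by_cases hw : w ∈ pk.2
    · have hc : s.contains pk.1 = true := by
        rw [PySem.Dict.contains_eq_decide_mem_keys]
        exact decide_eq_true (h pk (List.mem_cons_self))
      have hkeys : (s.modify pk.1 0 (· + 1)).keys = s.keys := by
        rw [PySem.Dict.keys_modify, PySem.Dict.keys_insert_of_contains _ _ hc]
      simp only [hw, if_true]
      rw [ih _ (fun q hq => hkeys ▸ h q (List.mem_cons_of_mem _ hq)), hkeys]
    · simp only [hw, if_false]
      exact ih _ (fun q hq => h q (List.mem_cons_of_mem _ hq))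

-- A's word loop preserves the key list.
theorem pv_keys_word_loop (tpItems : List (String × List String)) (ws : List String)
    (s : PySem.Dict String Int) (h : ∀ pk ∈ tpItems, pk.1 ∈ s.keys) :
    (ws.foldl (fun s w => tpItems.foldl (fun s pk =>
        if w ∈ pk.2 then s.modify pk.1 0 (· + 1) else s) s) s).keys = s.keys := by
  induction ws generalizing s with
  | nil => rfl
  | cons w rest ih =>
    rw [List.foldl_cons]
    have h1 := pv_keys_pat_scan tpItems s w h
    rw [ih _ (fun q hq => h1 ▸ h q hq), h1]

-- The sum of the counter's values over the distinct keywords equals the number of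
-- words that belong to the keyword list.
theorem pv_sum_counts (kws ws : List String) :
    ((PySem.Set.ofList kws).map (fun kw => ((ws.count kw : Nat) : Int))).sum
      = (ws.countP (fun w => decide (w ∈ kws)) : Int) := by
  induction ws with
  | nil => simp
  | cons w rest ih =>
    have hstep : ((PySem.Set.ofList kws).map (fun kw => (((w :: rest).count kw : Nat) : Int)))
        = (PySem.Set.ofList kws).map (fun kw =>
            ((rest.count kw : Nat) : Int) + (if kw == w then (1 : Int) else 0)) := by
      refine List.map_congr_left (fun kw _ => ?_)
      rw [List.count_cons]
      by_cases hkw : w = kw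
      · simp [hkw]
      · simp [hkw, Ne.symm hkw]
    rw [hstep, PySem.List.sum_map_add_int, ih, PySem.List.sum_map_ite_one_zero,
      List.countP_cons]
    have : (PySem.Set.ofList kws).countP (fun kw => kw == w)
        = if w ∈ kws then 1 else 0 := by
      by_cases hw : w ∈ kws
      · have := List.count_eq_one_of_mem (PySem.Set.nodup_ofList kws)
          ((PySem.Set.mem_ofList kws w).mpr hw)
        simpa [List.count, hw] using this
      · have : w ∉ PySem.Set.ofList kws := fun hc => hw ((PySem.Set.mem_ofList kws w).mp hc)
        rw [List.countP_eq_zero.mpr (fun x hx => by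
          simp only [beq_iff_eq]
          intro hxw; exact this (hxw ▸ hx))]
        simp [hw]
    rw [this]
    by_cases hw : w ∈ kws
    · simp [hw]
    · simp [hw]

-- ===== VERDICT (by name: the statement is the Claim_ definition above) =====
theorem identify_thinking_patterns_spec : Claim_equal_identify_thinking_patterns := by
  intro user_responses thinking_patterns _
  show identify_thinking_patterns user_responses thinking_patterns
      = identify_thinking_patterns_alt user_responses thinking_patterns
  unfold identify_thinking_patterns identify_thinking_patterns_alt
  simp only
  set tp := PySem.Dict.ofList thinking_patterns with htp
  have hndk : tp.keys.Nodup := PySem.Dict.nodup_keys_ofList thinking_patterns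
  -- B's counter over the flattened words
  have hcounts : user_responses.foldl (fun counts response =>
      response.foldl (fun counts word => counts.insert word (counts.getD word 0 + 1)) counts)
      (PySem.Dict.empty : PySem.Dict String Int)
      = PySem.Dict.counter (user_responses.flatMap id) := by
    rw [← PySem.Dict.foldl_insert_getD_add_one_eq_counter, List.foldl_flatMap]
    rfl
  -- B's result as a map over tp.items
  have hBfresh : (tp.items.foldl (fun res pk =>
      res.insert pk.1 (((PySem.Set.ofList pk.2).map
        (fun kw => (PySem.Dict.counter (user_responses.flatMap id)).getD kw 0)).sum))
      (PySem.Dict.empty : PySem.Dict String Int)).items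
      = tp.items.map (fun pk => (pk.1,
          ((PySem.Set.ofList pk.2).map
            (fun kw => (PySem.Dict.counter (user_responses.flatMap id)).getD kw 0)).sum)) := by
    rw [PySem.Dict.items_foldl_insert_fresh tp.items (·.1) _ _
      (fun a _ => PySem.Dict.contains_empty a.1) hndk]
    rfl
  rw [hcounts, hBfresh]
  set words := user_responses.flatMap id with hwords
  set init := tp.keys.foldl (fun d p => d.insert p (0 : Int)) PySem.Dict.empty with hinit
  -- A's nested word folds as one fold over the flattened words
  have hA : user_responses.foldl (fun scores response =>
      response.foldl (fun scores word =>
        tp.items.foldl (fun scores pk =>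
          if word ∈ pk.2 then scores.modify pk.1 0 (· + 1) else scores) scores) scores) init
      = words.foldl (fun scores word =>
        tp.items.foldl (fun scores pk =>
          if word ∈ pk.2 then scores.modify pk.1 0 (· + 1) else scores) scores) init := by
    rw [hwords, List.foldl_flatMap]
    rfl
  rw [hA]
  -- A's final key list is tp.keys
  have hkinit : init.keys = tp.keys := by
    rw [hinit, PySem.Dict.keys_foldl_insert, PySem.Dict.keys_empty,
      PySem.Set.update_nil_left, PySem.Set.ofList_eq_self_of_nodup _ hndk]
  have hkeys : (words.foldl (fun s w => tp.items.foldl (fun s pk =>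
      if w ∈ pk.2 then s.modify pk.1 0 (· + 1) else s) s) init).keys = tp.keys := by
    rw [pv_keys_word_loop tp.items words init
      (fun pk hpk => hkinit ▸ PySem.Dict.mem_keys_of_mem_items _ hpk), hkinit]
  have hnodupA : (words.foldl (fun s w => tp.items.foldl (fun s pk =>
      if w ∈ pk.2 then s.modify pk.1 0 (· + 1) else s) s) init).keys.Nodup := hkeys ▸ hndk
  -- express B's side as a map over tp.keys
  have hB2 : tp.items.map (fun pk => (pk.1,
        ((PySem.Set.ofList pk.2).map (fun kw => (PySem.Dict.counter words).getD kw 0)).sum))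
      = tp.keys.map (fun k => (k,
        ((PySem.Set.ofList (tp.getD k [])).map
          (fun kw => (PySem.Dict.counter words).getD kw 0)).sum)) := by
    conv_lhs => rw [PySem.Dict.items_eq_map_keys tp hndk []]
    rw [List.map_map]
    exact List.map_congr_left (fun k _ => rfl)
  rw [PySem.Dict.items_eq_map_keys _ hnodupA 0, hkeys, hB2]
  refine List.map_congr_left (fun k hk => ?_)
  -- the keyword list bound to k in tp
  obtain ⟨pk, hpkmem, hpk1⟩ := List.mem_map.mp (hk : k ∈ tp.items.map (·.1))
  have hmem : (k, tp.getD k []) ∈ tp.items := by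
    have := PySem.Dict.getD_of_mem_items tp (hpk1 ▸ hpkmem : (k, pk.2) ∈ tp.items) hndk []
    rw [this]
    exact hpk1 ▸ hpkmem
  refine congrArg (fun v => (k, v)) ?_
  rw [pv_word_loop tp.items k (tp.getD k []) hndk hmem words init,
    pv_getD_init tp.keys PySem.Dict.empty k (PySem.Dict.getD_empty _ _), zero_add]
  have hcnt : (fun kw => (PySem.Dict.counter words).getD kw 0)
      = fun kw => ((words.count kw : Nat) : Int) := by
    funext kw; exact PySem.Dict.getD_counter words kw
  rw [hcnt, pv_sum_counts]
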